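-- pv_equiv track=rewrite | github.com/z-zroud/CardScript | perso_lib/dp_format/szsm_dp.py | process_tlv
-- ===== SOURCE A (Python) =====
-- def process_tlv(data):
--     item_list = []
--     items = data.split('|')
--     items_count = len(items)
--     for index in range(0,items_count,3):
--         if index + 3 > items_count:
--             break
--         tag = items[index]
--         length = items[index + 1]
--         value = items[index + 2]
--         item_list.append((tag,length,value))
--     return item_list
-- ===== SOURCE B (Python) =====
-- def process_tlv(data):
--     items = data.split('|')
--     return list(zip(items[0::3], items[1::3], items[2::3]))
-- ===== Notes on version B (the rewrite author's own statement) =====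
-- stated objective: idiomatic
-- what changed: Replaces the index loop with break by zipping the three strided slices items[0::3], items[1::3], items[2::3]; zip's truncation to the shortest slice reproduces the dropping of an incomplete trailing triple.
import Mathlib
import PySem

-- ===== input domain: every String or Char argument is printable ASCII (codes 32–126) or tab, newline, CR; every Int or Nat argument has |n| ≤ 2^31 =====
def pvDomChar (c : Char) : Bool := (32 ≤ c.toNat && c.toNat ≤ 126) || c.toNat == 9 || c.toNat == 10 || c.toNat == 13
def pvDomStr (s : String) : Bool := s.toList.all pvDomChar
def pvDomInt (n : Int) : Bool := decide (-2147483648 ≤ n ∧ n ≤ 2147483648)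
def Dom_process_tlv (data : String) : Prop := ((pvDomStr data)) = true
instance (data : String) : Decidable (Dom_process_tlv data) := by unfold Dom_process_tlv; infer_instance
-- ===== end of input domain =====

-- B replaces A's index loop (step 3, break on incomplete triple) by zipping the three
-- strided slices items[0::3], items[1::3], items[2::3] (idiomatic; same cost).

-- ===== PORT A =====
-- the for-loop over range(0, items_count, 3) with its break; items[index+k] via getD
-- (the indices are in range whenever the break has not fired, so getD is exact)
def processTlvLoop (items : List String) (count : Nat) (index : Nat) :
    List (String × String × String) :=
  if index + 3 > count then []
  else (items.getD index "", items.getD (index + 1) "", items.getD (index + 2) "") ::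
       processTlvLoop items count (index + 3)
termination_by count - index
decreasing_by omega

def process_tlv (data : String) : List (String × String × String) :=
  -- data.split('|'): sep "|" ≠ "" so split? is always some
  let items := (PySem.Str.split? data "|").getD []
  let items_count := items.length
  processTlvLoop items items_count 0

-- ===== PORT B =====
-- hand port of the stride-3 slice items[k::3] applied to `l = items.drop k`
-- (exact: a Python extended slice with step 3 takes every third element)
def stride3 (l : List String) : List String :=
  match l with
  | [] => []
  | a :: rest => a :: stride3 (rest.drop 2)
termination_by l.length
decreasing_by simp only [List.length_drop, List.length_cons]; omega

def process_tlv_alt (data : String) : List (String × String × String) :=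
  let items := (PySem.Str.split? data "|").getD []
  (stride3 items).zip ((stride3 (items.drop 1)).zip (stride3 (items.drop 2)))

-- ===== PRECONDITION & SPEC =====
def Spec_process_tlv (data : String) (out : List (String × String × String)) : Prop := out = process_tlv_alt data
instance (data : String) (out : List (String × String × String)) : Decidable (Spec_process_tlv data out) := by unfold Spec_process_tlv; infer_instance

-- ===== CLAIM (what is proved, stated in full; the proofs are below) =====
def Claim_equal_process_tlv : Prop := ∀ (data : String), Dom_process_tlv data → Spec_process_tlv data (process_tlv data)

-- ===== LEMMAS AND PROOFS =====

theorem stride3_nil : stride3 [] = [] := by rw [stride3.eq_def]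

theorem stride3_cons (a : String) (rest : List String) :
    stride3 (a :: rest) = a :: stride3 (rest.drop 2) := by rw [stride3.eq_def]

-- shifting the loop start past one consumed triple
theorem processTlvLoop_shift (a b c : String) (rest : List String) (i : Nat) :
    processTlvLoop (a :: b :: c :: rest) (rest.length + 3) (i + 3) =
    processTlvLoop rest rest.length i := by
  by_cases h : i + 3 > rest.length
  · conv_lhs => rw [processTlvLoop]
    conv_rhs => rw [processTlvLoop]
    rw [if_pos h, if_pos (show i + 3 + 3 > rest.length + 3 by omega)]
  · conv_lhs => rw [processTlvLoop]
    conv_rhs => rw [processTlvLoop]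
    rw [if_neg h, if_neg (show ¬ (i + 3 + 3 > rest.length + 3) by omega)]
    rw [show i + 3 + 3 = (i + 3) + 3 from rfl, processTlvLoop_shift a b c rest (i + 3)]
    simp [List.getD]
termination_by rest.length - i
decreasing_by omega

-- the loop from index 0 equals the zip of the three strided slices
theorem loop_eq_zip (l : List String) :
    processTlvLoop l l.length 0 =
    (stride3 l).zip ((stride3 (l.drop 1)).zip (stride3 (l.drop 2))) := by
  match l with
  | [] => rw [processTlvLoop]; simp [stride3_nil]
  | [a] => rw [processTlvLoop]; simp [stride3_cons, stride3_nil]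
  | [a, b] => rw [processTlvLoop]; simp [stride3_cons, stride3_nil]
  | a :: b :: c :: rest =>
    conv_lhs => rw [processTlvLoop]
    rw [if_neg (by simp)]
    have hs := processTlvLoop_shift a b c rest 0
    simp only [List.length_cons] at *
    rw [show rest.length + 1 + 1 + 1 = rest.length + 3 from by omega] at *
    rw [show (0:Nat) + 3 = 3 from rfl] at hs
    rw [hs, loop_eq_zip rest]
    simp [stride3_cons, List.getD]
termination_by l.length

-- ===== VERDICT (by name: the statement is the Claim_ definition above) =====
theorem process_tlv_spec : Claim_equal_process_tlv := by
  intro data _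
  unfold Spec_process_tlv process_tlv process_tlv_alt
  exact loop_eq_zip _
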